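-- pv_equiv track=rewrite | github.com/Snow-dash/MCTag_to_MCWModule | main.py | gen_tag
-- ===== SOURCE A (Python) =====
-- def gen_tag(dic):
--     out = {}
--     re = False
--     for tp in dic:
--         for tag in dic[tp]:
--             if tp not in out:
--                 out[tp] = {}
--             if tag not in out[tp]:
--                 out[tp][tag] = []
--             for item in dic[tp][tag]:
--                 if "#" in item:
--                     for i in dic[tp][item[11:]]:
--                         if i.startswith("minecraft:"):
--                             out[tp][tag].append(i[10:])
--                         else:
--                             out[tp][tag].append(i)
--                     re = True
--                 else:
--                     if item.startswith("minecraft:"):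
--                         out[tp][tag].append(item[10:])
--                     else:
--                         out[tp][tag].append(item)
--     if re:
--         return gen_tag(out)
--     return out
-- ===== SOURCE B (Python) =====
-- def gen_tag(dic):
--     # One top-down recursive resolution per tag instead of A's repeated
--     # whole-dictionary rewrite passes.
--     def strip(s):
--         return s[10:] if s.startswith("minecraft:") else s
--
--     out = {}
--     for tp, tags in dic.items():
--         if not tags:
--             continue  # A never creates an entry for a type with no tags
--
--         def resolve(tag):
--             res = []
--             for item in tags[tag]:
--                 if "#" in item:
--                     res.extend(resolve(item[11:]))
--                 else:
--                     res.append(strip(item))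
--             return res
--
--         out[tp] = {tag: resolve(tag) for tag in tags}
--     return out
-- ===== Notes on version B (the rewrite author's own statement) =====
-- stated objective: alternative
-- what changed: A repeatedly rewrites the whole dictionary one reference level per global pass until no '#' item was seen, re-stripping every item each pass; B resolves each tag once by direct recursion on the reference structure, stripping each plain item exactly once.
import Mathlib
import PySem

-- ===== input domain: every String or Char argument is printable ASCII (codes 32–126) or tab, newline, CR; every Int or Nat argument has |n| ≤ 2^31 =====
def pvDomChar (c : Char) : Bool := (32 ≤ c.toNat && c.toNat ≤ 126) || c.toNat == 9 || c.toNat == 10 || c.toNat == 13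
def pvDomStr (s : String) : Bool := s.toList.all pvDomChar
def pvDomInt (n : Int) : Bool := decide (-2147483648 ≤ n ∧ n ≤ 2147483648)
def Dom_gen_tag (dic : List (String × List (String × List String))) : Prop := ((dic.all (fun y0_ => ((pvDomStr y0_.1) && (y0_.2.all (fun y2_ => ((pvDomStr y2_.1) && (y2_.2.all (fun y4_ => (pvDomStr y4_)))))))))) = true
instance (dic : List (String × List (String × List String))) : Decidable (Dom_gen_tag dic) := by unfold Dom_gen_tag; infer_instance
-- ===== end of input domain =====

-- B replaces A's repeated whole-dictionary rewrite passes by one direct recursive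
-- resolution per tag (objective: alternative algorithm, same results).


-- Shared leaf helpers (both Pythons contain these same elementary pieces):
-- '"#" in item', 'item[11:]', 'item[10:] if item.startswith("minecraft:") else item',
-- and the dict lookup 'tags[k]' (its KeyError case is excluded by Pre_, so the []
-- default is never reached on admitted inputs).
def pvIsRef (s : String) : Bool := PySem.Str.isIn "#" s
def pvKey (s : String) : String := PySem.Str.slice s (some 11) none
def pvStrip (s : String) : String :=
  if PySem.Str.startswith s "minecraft:" then PySem.Str.slice s (some 10) none else s
def getT (tags : List (String × List String)) (k : String) : List String :=
  (PySem.Dict.mk tags).getD k []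

-- ===== PORT A =====
-- A's inner 'for item in dic[tp][tag]' loop, threading (out[tp][tag], re).
def genTagItems (tags : List (String × List String)) (items : List String)
    (st : List String × Bool) : List String × Bool :=
  items.foldl (fun st item =>
    if pvIsRef item then
      ((getT tags (pvKey item)).foldl (fun l i => l ++ [pvStrip i]) st.1, true)
    else (st.1 ++ [pvStrip item], st.2)) st

-- One call-level of A's body (the two nested loops).  Under Pre_ all tp/tag keys are
-- distinct, so Python's dict insertions at fresh keys are appends, and out[tp] is only
-- touched while tp is being processed; the port threads it locally.
def genTagPass (dic : List (String × List (String × List String))) :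
    List (String × List (String × List String)) × Bool :=
  dic.foldl (fun st p =>
    let r := p.2.foldl (fun st2 tg =>
        let q := genTagItems p.2 tg.2 ([], st2.2)
        (st2.1 ++ [(tg.1, q.1)], q.2)) (([] : List (String × List String)), st.2)
    (if p.2.isEmpty then st.1 else st.1 ++ [(p.1, r.1)], r.2)) ([], false)

-- A's self-recursion 'if re: return gen_tag(out)'.  The fuel only makes the recursion
-- total in Lean: under Pre_ it is never exhausted (proved below); outside Pre_ Python A
-- diverges or raises.
def genTagGo : Nat → List (String × List (String × List String)) → List (String × List (String × List String))
  | 0, dic => dic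
  | f+1, dic =>
    let r := genTagPass dic
    if r.2 then genTagGo f r.1 else r.1

def gen_tag (dic : List (String × List (String × List String))) : List (String × List (String × List String)) :=
  genTagGo ((dic.map (fun p => p.2.length)).sum + 2) dic

-- ===== PORT B =====
-- B's 'resolve(tag)' recursion; the fuel only makes it total (cycles are outside Pre_).
def resolveTag (tags : List (String × List String)) : Nat → String → List String
  | 0, _ => []
  | f+1, tag =>
    (getT tags tag).foldl
      (fun res item => if pvIsRef item then res ++ resolveTag tags f (pvKey item)
                       else res ++ [pvStrip item]) []

def gen_tag_alt (dic : List (String × List (String × List String))) : List (String × List (String × List String)) :=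
  dic.foldl (fun out p =>
    if p.2.isEmpty then out
    else out ++ [(p.1, p.2.map (fun tg => (tg.1, resolveTag p.2 (p.2.length + 1) tg.1)))]) []

-- ===== PRECONDITION & SPEC =====
def pvNoDouble (s : String) : Bool :=
  !(PySem.Str.startswith s "minecraft:" &&
    PySem.Str.startswith (PySem.Str.slice s (some 10) none) "minecraft:")

def pvItemOK (item : String) : Bool :=
  if pvIsRef item then !PySem.Str.startswith item "minecraft:" else pvNoDouble item

-- reference-depth bound: every '#' item's target 'item[11:]' exists among the tags of
-- the same type, and the target's own references are bounded one level lower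
-- (⇒ no dangling reference, no reference cycle)
def pvBnd (tags : List (String × List String)) : Nat → String → Bool
  | 0, tag => (getT tags tag).all (fun item => !pvIsRef item)
  | f+1, tag => (getT tags tag).all (fun item =>
      !pvIsRef item ||
      ((PySem.Dict.mk tags).contains (pvKey item) && pvBnd tags f (pvKey item)))

-- Pre_ excludes: association lists with duplicate type or tag keys (they denote no
-- single Python dict — dict construction collapses them); inputs with a dangling or
-- cyclic tag reference (A raises KeyError resp. RecursionError, and so does B); items
-- containing '#' that also start with 'minecraft:', and plain items with a doubled
-- 'minecraft:minecraft:' prefix (there A's value depends on how many rewrite passes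
-- happen to run — it strips one prefix per pass — while B strips exactly once).
def Pre_gen_tag (dic : List (String × List (String × List String))) : Prop :=
  (dic.map Prod.fst).Nodup ∧
  ∀ p ∈ dic, (p.2.map Prod.fst).Nodup ∧
    (∀ tg ∈ p.2, ∀ item ∈ tg.2, pvItemOK item = true) ∧
    (∀ tg ∈ p.2, pvBnd p.2 p.2.length tg.1 = true)

instance (dic : List (String × List (String × List String))) : Decidable (Pre_gen_tag dic) := by
  unfold Pre_gen_tag; infer_instance

def pvWitness_gen_tag : (List (String × List (String × List String))) :=
  [("item", [("logs", ["minecraft:oak", "#minecraft:planks"]), ("planks", ["minecraft:birch"])])]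

def Spec_gen_tag (dic : List (String × List (String × List String))) (out : List (String × List (String × List String))) : Prop := out = gen_tag_alt dic
instance (dic : List (String × List (String × List String))) (out : List (String × List (String × List String))) : Decidable (Spec_gen_tag dic out) := by unfold Spec_gen_tag; infer_instance

-- ===== CLAIM (what is proved, stated in full; the proofs are below) =====
def Claim_equal_gen_tag : Prop := ∀ (dic : List (String × List (String × List String))), Dom_gen_tag dic → Pre_gen_tag dic → Spec_gen_tag dic (gen_tag dic)

-- ===== LEMMAS AND PROOFS =====

-- proof-side abbreviations
def expandItems (tags : List (String × List String)) (items : List String) : List String :=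
  items.flatMap (fun item =>
    if pvIsRef item then (getT tags (pvKey item)).map pvStrip else [pvStrip item])

def passTp (tags : List (String × List String)) : List (String × List String) :=
  tags.map (fun tg => (tg.1, expandItems tags tg.2))

def hasRefT (tags : List (String × List String)) : Bool :=
  tags.any (fun tg => tg.2.any pvIsRef)

def passD (dic : List (String × List (String × List String))) : List (String × List (String × List String)) :=
  (dic.filter (fun p => !p.2.isEmpty)).map (fun p => (p.1, passTp p.2))

def reD (dic : List (String × List (String × List String))) : Bool :=
  dic.any (fun p => hasRefT p.2)

def FF (tags : List (String × List String)) : Nat → String → List String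
  | 0, _ => []
  | f+1, tag => (getT tags tag).flatMap (fun item =>
      if pvIsRef item then FF tags f (pvKey item) else [pvStrip item])

def Bchar (dic : List (String × List (String × List String))) : List (String × List (String × List String)) :=
  (dic.filter (fun p => !p.2.isEmpty)).map
    (fun p => (p.1, p.2.map (fun tg => (tg.1, FF p.2 (p.2.length + 1) tg.1))))

def TagsOK (tags : List (String × List String)) : Prop :=
  (tags.map Prod.fst).Nodup ∧ ∀ tg ∈ tags, ∀ item ∈ tg.2, pvItemOK item = true

def InvD (dic : List (String × List (String × List String))) : Prop :=
  ∀ p ∈ dic, TagsOK p.2 ∧ ∀ tg ∈ p.2, pvBnd p.2 p.2.length tg.1 = true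

def DecD (dic : List (String × List (String × List String))) (d : Nat) : Prop :=
  ∀ p ∈ dic, ∀ tg ∈ p.2, pvBnd p.2 d tg.1 = true

theorem pvBnd_zero (tags : List (String × List String)) (tag : String) :
    pvBnd tags 0 tag = (getT tags tag).all (fun item => !pvIsRef item) := rfl

theorem pvBnd_succ (tags : List (String × List String)) (f : Nat) (tag : String) :
    pvBnd tags (f+1) tag = (getT tags tag).all (fun item =>
      !pvIsRef item ||
      ((PySem.Dict.mk tags).contains (pvKey item) && pvBnd tags f (pvKey item))) := rfl

-- ---------- small list facts ----------
theorem pvFlatMapCongr {α β : Type} {l : List α} {f g : α → List β}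
    (h : ∀ x ∈ l, f x = g x) : l.flatMap f = l.flatMap g := by
  induction l with
  | nil => rfl
  | cons a t ih =>
    simp only [List.flatMap_cons]
    rw [h a List.mem_cons_self, ih (fun x hx => h x (List.mem_cons_of_mem _ hx))]

theorem band_intro {a b : Bool} (h1 : a = true) (h2 : b = true) : (a && b) = true := by
  simp [h1, h2]

-- ---------- string-level facts ----------
theorem strip_of_not_sw {s : String} (h : PySem.Str.startswith s "minecraft:" = false) :
    pvStrip s = s := by simp only [pvStrip, h, Bool.false_eq_true, if_false]

theorem slice10_toList (s : String) :
    (PySem.Str.slice s (some 10) none).toList = s.toList.drop 10 := by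
  rw [PySem.Str.toList_slice, PySem.Chars.slice_eq_listSlice]
  simpa using PySem.List.slice_from (xs := s.toList) (a := (10:Int)) (by norm_num)

theorem isRef_strip {s : String} (h : pvIsRef s = false) :
    pvIsRef (pvStrip s) = false := by
  by_cases hsw : PySem.Str.startswith s "minecraft:"
  · simp only [pvStrip, hsw, if_true]
    simp only [pvIsRef] at h ⊢
    rw [PySem.Str.isIn_eq] at h ⊢
    rw [slice10_toList]
    rw [Bool.eq_false_iff] at h ⊢
    intro hc; apply h
    rw [PySem.Chars.isIn_iff_infix] at hc ⊢
    exact hc.trans (List.drop_suffix 10 s.toList).isInfix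
  · rw [strip_of_not_sw (by simpa using hsw)]; exact h

theorem noDouble_strip {s : String} (h : pvNoDouble s = true) :
    pvNoDouble (pvStrip s) = true := by
  by_cases hsw : PySem.Str.startswith s "minecraft:"
  · have hb : PySem.Str.startswith (PySem.Str.slice s (some 10) none) "minecraft:" = false := by
      simp only [pvNoDouble, hsw, Bool.true_and, Bool.not_eq_eq_eq_not, Bool.not_true] at h
      exact h
    simp only [pvStrip, hsw, if_true, pvNoDouble, hb, Bool.false_and, Bool.not_false]
  · rw [strip_of_not_sw (by simpa using hsw)]; exact h

theorem strip_strip {s : String} (h : pvNoDouble s = true) :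
    pvStrip (pvStrip s) = pvStrip s := by
  by_cases hsw : PySem.Str.startswith s "minecraft:"
  · have hb : PySem.Str.startswith (PySem.Str.slice s (some 10) none) "minecraft:" = false := by
      simp only [pvNoDouble, hsw, Bool.true_and, Bool.not_eq_eq_eq_not, Bool.not_true] at h
      exact h
    simp only [pvStrip, hsw, if_true]
    exact strip_of_not_sw hb
  · have h' : PySem.Str.startswith s "minecraft:" = false := by simpa using hsw
    rw [strip_of_not_sw h', strip_of_not_sw h']

theorem strip_of_ref {s : String} (hr : pvIsRef s = true) (h : pvItemOK s = true) :
    pvStrip s = s := by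
  rw [pvItemOK, if_pos hr] at h
  exact strip_of_not_sw (by simpa using h)

theorem itemOK_strip {s : String} (h : pvItemOK s = true) :
    pvItemOK (pvStrip s) = true := by
  by_cases hr : pvIsRef s
  · rw [strip_of_ref hr h]; exact h
  · rw [pvItemOK, if_neg hr] at h
    rw [pvItemOK, if_neg (by simp [isRef_strip (by simpa using hr)])]
    exact noDouble_strip h

-- ---------- getT facts ----------
theorem getT_nil (k : String) : getT [] k = [] := by rfl

theorem getT_cons (a : String × List String) (tags : List (String × List String)) (k : String) :
    getT (a :: tags) k = if a.1 == k then a.2 else getT tags k := by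
  obtain ⟨k1, v1⟩ := a
  simp only [getT, PySem.Dict.getD_eq_get?_getD, PySem.Dict.get?_mk_cons]
  split <;> rfl

theorem contains_eq_mem_fst (tags : List (String × List String)) (k : String) :
    ((PySem.Dict.mk tags).contains k = true) ↔ k ∈ tags.map Prod.fst := by
  rw [PySem.Dict.contains_mk]
  constructor
  · intro hc
    obtain ⟨p, hp, he⟩ := List.any_eq_true.mp hc
    exact (beq_iff_eq.mp he) ▸ List.mem_map_of_mem hp
  · intro hm
    obtain ⟨p, hp, he⟩ := List.mem_map.mp hm
    exact List.any_eq_true.mpr ⟨p, hp, beq_iff_eq.mpr he⟩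

theorem getT_map (h : List (String × List String) → List String → List String)
    (tags l : List (String × List String)) (k : String) (hnil : h tags [] = []) :
    getT (l.map (fun tg => (tg.1, h tags tg.2))) k = h tags (getT l k) := by
  induction l with
  | nil => simp only [List.map_nil, getT_nil]; exact hnil.symm
  | cons a t ih =>
    simp only [List.map_cons, getT_cons]
    split <;> simp [ih]

theorem getT_passTp (tags : List (String × List String)) (k : String) :
    getT (passTp tags) k = expandItems tags (getT tags k) := by
  exact getT_map expandItems tags tags k rfl

theorem getT_self {tags : List (String × List String)} (hnd : (tags.map Prod.fst).Nodup)
    {tg : String × List String} (htg : tg ∈ tags) : getT tags tg.1 = tg.2 := by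
  induction tags with
  | nil => cases htg
  | cons a t ih =>
    simp only [List.map_cons, List.nodup_cons] at hnd
    rcases List.mem_cons.mp htg with heq | hmem
    · subst heq; simp [getT_cons]
    · rw [getT_cons]
      have hne : ¬ (a.1 == tg.1) = true := by
        simp only [beq_iff_eq]; intro he
        exact hnd.1 (he ▸ List.mem_map_of_mem hmem)
      rw [if_neg hne]
      exact ih hnd.2 hmem

theorem mem_getT {tags : List (String × List String)} {k : String} {item : String}
    (h : item ∈ getT tags k) : ∃ tg ∈ tags, item ∈ tg.2 := by
  induction tags with
  | nil => simp [getT_nil] at h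
  | cons a t ih =>
    rw [getT_cons] at h
    split at h
    · exact ⟨a, List.mem_cons_self, h⟩
    · obtain ⟨tg, htg, hi⟩ := ih h
      exact ⟨tg, List.mem_cons_of_mem _ htg, hi⟩

theorem itemOK_getT {tags : List (String × List String)} (hok : TagsOK tags)
    {k item : String} (h : item ∈ getT tags k) : pvItemOK item = true := by
  obtain ⟨tg, htg, hi⟩ := mem_getT h
  exact hok.2 tg htg item hi

-- ---------- characterization of port A's single pass ----------
theorem L_items (tags : List (String × List String)) (items : List String)
    (l : List String) (r : Bool) :
    genTagItems tags items (l, r) = (l ++ expandItems tags items, r || items.any pvIsRef) := by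
  induction items generalizing l r with
  | nil => simp [genTagItems, expandItems]
  | cons x xs ih =>
    simp only [genTagItems, List.foldl_cons] at *
    by_cases hx : pvIsRef x
    · rw [if_pos hx]
      rw [PySem.List.foldl_append_singleton_eq_map]
      rw [ih]
      simp [expandItems, hx]
    · rw [if_neg hx]
      rw [ih]
      simp [expandItems, hx, Bool.or_assoc]

theorem L_inner' (tags0 : List (String × List String)) (tags : List (String × List String))
    (m : List (String × List String)) (b : Bool) :
    tags.foldl (fun st2 tg =>
        (st2.1 ++ [(tg.1, expandItems tags0 tg.2)], st2.2 || tg.2.any pvIsRef)) (m, b)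
      = (m ++ tags.map (fun tg => (tg.1, expandItems tags0 tg.2)),
         b || tags.any (fun tg => tg.2.any pvIsRef)) := by
  induction tags generalizing m b with
  | nil => simp
  | cons x xs ih =>
    simp only [List.foldl_cons, List.map_cons, List.any_cons]
    rw [ih]
    simp [Bool.or_assoc]

theorem L_inner0 (tags0 : List (String × List String)) (tags : List (String × List String))
    (b : Bool) :
    tags.foldl (fun st2 tg =>
        let q := genTagItems tags0 tg.2 ([], st2.2)
        (st2.1 ++ [(tg.1, q.1)], q.2)) (([] : List (String × List String)), b)
      = (tags.map (fun tg => (tg.1, expandItems tags0 tg.2)),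
         b || tags.any (fun tg => tg.2.any pvIsRef)) := by
  have h := L_inner' tags0 tags [] b
  simp only [List.nil_append] at h
  rw [← h]
  simp only [L_items, List.nil_append]

theorem L_pass (dic : List (String × List (String × List String))) :
    genTagPass dic = (passD dic, reD dic) := by
  suffices h : ∀ (acc : List (String × List (String × List String)) × Bool),
      dic.foldl (fun st p =>
        ((if p.2.isEmpty then st.1
          else st.1 ++ [(p.1, p.2.map (fun tg => (tg.1, expandItems p.2 tg.2)))]),
         st.2 || p.2.any (fun tg => tg.2.any pvIsRef))) acc
      = (acc.1 ++ passD dic, acc.2 || reD dic) by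
    unfold genTagPass
    simp only [L_inner0]
    simpa using h ([], false)
  induction dic with
  | nil => simp [passD, reD]
  | cons p t ih =>
    intro acc
    simp only [List.foldl_cons]
    rw [ih]
    by_cases hp : p.2.isEmpty
    · simp [passD, reD, hp, hasRefT, passTp]
      simp [List.isEmpty_iff.mp hp, hasRefT]
    · simp [passD, reD, hp, hasRefT, passTp, Bool.or_assoc]

-- ---------- characterization of port B ----------
theorem L_resolve (tags : List (String × List String)) (f : Nat) (tag : String) :
    resolveTag tags f tag = FF tags f tag := by
  induction f generalizing tag with
  | zero => rfl
  | succ f ih =>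
    show (getT tags tag).foldl _ [] = _
    have hcong : (getT tags tag).foldl
        (fun res item => if pvIsRef item then res ++ resolveTag tags f (pvKey item)
                         else res ++ [pvStrip item]) []
      = (getT tags tag).foldl
        (fun res item => res ++ (if pvIsRef item then FF tags f (pvKey item)
                         else [pvStrip item])) [] := by
      apply PySem.List.foldl_congr_mem
      intro acc x _
      by_cases hx : pvIsRef x <;> simp [hx, ih]
    rw [hcong, PySem.List.foldl_append_eq_flatMap]
    rfl

theorem L_Balt (dic : List (String × List (String × List String))) :
    gen_tag_alt dic = Bchar dic := by
  suffices h : ∀ acc,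
      dic.foldl (fun out p =>
        if p.2.isEmpty then out
        else out ++ [(p.1, p.2.map (fun tg => (tg.1, resolveTag p.2 (p.2.length + 1) tg.1)))]) acc
      = acc ++ Bchar dic by
    simpa [gen_tag_alt] using h []
  induction dic with
  | nil => simp [Bchar]
  | cons p t ih =>
    intro acc
    rw [List.foldl_cons]
    by_cases hp : p.2.isEmpty
    · simp only [hp, if_true]
      rw [ih]
      simp [Bchar, List.filter_cons, hp]
    · simp only [if_neg hp]
      rw [ih]
      simp [Bchar, List.filter_cons, hp, L_resolve, List.append_assoc]

-- ---------- bound lemmas ----------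
theorem pvBnd_mono {tags : List (String × List String)} :
    ∀ {f : Nat} {tag : String}, pvBnd tags f tag = true → pvBnd tags (f+1) tag = true := by
  suffices H : ∀ f tag, pvBnd tags f tag = true → pvBnd tags (f+1) tag = true from
    fun {f tag} h => H f tag h
  intro f
  induction f with
  | zero =>
    intro tag h
    rw [pvBnd_zero] at h
    rw [pvBnd_succ]
    rw [List.all_eq_true] at h ⊢
    intro item hi
    exact Bool.or_inl (h item hi)
  | succ f ih =>
    intro tag h
    rw [pvBnd_succ] at h
    rw [pvBnd_succ]
    rw [List.all_eq_true] at h ⊢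
    intro item hi
    rcases Bool.or_eq_true _ _ ▸ (h item hi) with h1 | h2
    · exact Bool.or_inl h1
    · obtain ⟨hc, hb⟩ := Bool.and_eq_true _ _ ▸ h2
      exact Bool.or_inr (band_intro hc (ih _ hb))

theorem pvBnd_le {tags : List (String × List String)} {f g : Nat} (hfg : f ≤ g) {tag : String}
    (h : pvBnd tags f tag = true) : pvBnd tags g tag = true := by
  induction g, hfg using Nat.le_induction with
  | base => exact h
  | succ g _ ih => exact pvBnd_mono ih

theorem bnd_pass {tags : List (String × List String)} (hok : TagsOK tags) :
    ∀ {f : Nat} {tag : String}, pvBnd tags (f+1) tag = true →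
      pvBnd (passTp tags) f tag = true := by
  suffices H : ∀ f tag, pvBnd tags (f+1) tag = true → pvBnd (passTp tags) f tag = true from
    fun {f tag} h => H f tag h
  intro f
  induction f with
  | zero =>
    intro tag h
    rw [pvBnd_succ] at h
    rw [pvBnd_zero, getT_passTp, List.all_eq_true]
    intro j hj
    simp only [expandItems, List.mem_flatMap] at hj
    obtain ⟨item, hitem, hji⟩ := hj
    have hh := List.all_eq_true.mp h item hitem
    by_cases hr : pvIsRef item
    · rw [if_pos hr] at hji
      simp only [hr, Bool.not_true, Bool.false_or, Bool.and_eq_true] at hh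
      rw [pvBnd_zero] at hh
      have hh2all := hh.2
      obtain ⟨r, hrmem, hjr⟩ := List.mem_map.mp hji
      have := List.all_eq_true.mp hh2all r hrmem
      subst hjr
      simp [isRef_strip (by simpa using this)]
    · rw [if_neg hr] at hji
      simp only [List.mem_singleton] at hji
      subst hji
      simp [isRef_strip (by simpa using hr)]
  | succ f ih =>
    intro tag h
    rw [pvBnd_succ] at h
    rw [pvBnd_succ, getT_passTp, List.all_eq_true]
    intro j hj
    simp only [expandItems, List.mem_flatMap] at hj
    obtain ⟨item, hitem, hji⟩ := hj
    have hh := List.all_eq_true.mp h item hitem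
    by_cases hr : pvIsRef item
    · rw [if_pos hr] at hji
      simp only [hr, Bool.not_true, Bool.false_or, Bool.and_eq_true] at hh
      obtain ⟨r, hrmem, hjr⟩ := List.mem_map.mp hji
      subst hjr
      by_cases hrr : pvIsRef r
      · have hstr : pvStrip r = r := strip_of_ref hrr (itemOK_getT hok hrmem)
        rw [hstr]
        have hhr := List.all_eq_true.mp (by rw [pvBnd_succ] at hh; exact hh.2) r hrmem
        simp only [hrr, Bool.not_true, Bool.false_or, Bool.and_eq_true] at hhr
        have hkeys : (passTp tags).map Prod.fst = tags.map Prod.fst := by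
          simp [passTp, List.map_map, Function.comp]
        have hcont : (PySem.Dict.mk (passTp tags)).contains (pvKey r) = true := by
          rw [contains_eq_mem_fst, hkeys]
          exact (contains_eq_mem_fst tags (pvKey r)).mp hhr.1
        exact Bool.or_inr (band_intro hcont (ih (pvKey r) (pvBnd_mono hhr.2)))
      · exact Bool.or_inl (by
          simp [isRef_strip (show pvIsRef r = false by simpa using hrr)])
    · rw [if_neg hr] at hji
      simp only [List.mem_singleton] at hji
      subst hji
      exact Bool.or_inl (by
        simp [isRef_strip (show pvIsRef item = false by simpa using hr)])

theorem FF_stab {tags : List (String × List String)} :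
    ∀ {f : Nat} {tag : String}, pvBnd tags f tag = true →
      ∀ {g h : Nat}, f + 1 ≤ g → f + 1 ≤ h → FF tags g tag = FF tags h tag := by
  suffices H : ∀ f tag, pvBnd tags f tag = true →
      ∀ g h, f + 1 ≤ g → f + 1 ≤ h → FF tags g tag = FF tags h tag from
    fun {f tag} hb {g h} hg hh => H f tag hb g h hg hh
  intro f
  induction f with
  | zero =>
    intro tag hb g h hg hh
    obtain ⟨g', rfl⟩ : ∃ g', g = g' + 1 := ⟨g - 1, by omega⟩
    obtain ⟨h', rfl⟩ : ∃ h', h = h' + 1 := ⟨h - 1, by omega⟩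
    rw [FF, FF]
    apply pvFlatMapCongr
    intro item hitem
    rw [pvBnd_zero] at hb
    have := List.all_eq_true.mp hb item hitem
    simp only [Bool.not_eq_eq_eq_not, Bool.not_true] at this
    rw [if_neg (by simp [this]), if_neg (by simp [this])]
  | succ f ih =>
    intro tag hb g h hg hh
    obtain ⟨g', rfl⟩ : ∃ g', g = g' + 1 := ⟨g - 1, by omega⟩
    obtain ⟨h', rfl⟩ : ∃ h', h = h' + 1 := ⟨h - 1, by omega⟩
    rw [FF, FF]
    apply pvFlatMapCongr
    intro item hitem
    rw [pvBnd_succ] at hb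
    have hh2 := List.all_eq_true.mp hb item hitem
    by_cases hr : pvIsRef item
    · simp only [hr, Bool.not_true, Bool.false_or, Bool.and_eq_true] at hh2
      rw [if_pos hr, if_pos hr]
      exact ih (pvKey item) hh2.2 g' h' (by omega) (by omega)
    · rw [if_neg hr, if_neg hr]

theorem FF_pass {tags : List (String × List String)} (hok : TagsOK tags) :
    ∀ {f : Nat} {tag : String}, pvBnd tags f tag = true →
      ∀ {g h : Nat}, f + 1 ≤ g → f + 1 ≤ h →
        FF (passTp tags) g tag = FF tags h tag := by
  suffices H : ∀ f tag, pvBnd tags f tag = true →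
      ∀ g h, f + 1 ≤ g → f + 1 ≤ h → FF (passTp tags) g tag = FF tags h tag from
    fun {f tag} hb {g h} hg hh => H f tag hb g h hg hh
  intro f
  induction f using Nat.strong_induction_on with
  | _ f ihs =>
    intro tag hb g h hg hh
    obtain ⟨g', rfl⟩ : ∃ g', g = g' + 1 := ⟨g - 1, by omega⟩
    obtain ⟨h', rfl⟩ : ∃ h', h = h' + 1 := ⟨h - 1, by omega⟩
    rw [FF, FF, getT_passTp]
    unfold expandItems
    rw [List.flatMap_assoc]
    apply pvFlatMapCongr
    intro item hitem
    have hiok : pvItemOK item = true := itemOK_getT hok hitem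
    by_cases hr : pvIsRef item
    · simp only [if_pos hr]
      -- f must be a successor: a ref item is incompatible with pvBnd 0
      obtain ⟨f0, rfl⟩ : ∃ f0, f = f0 + 1 := by
        rcases f with _ | f0
        · exfalso
          rw [pvBnd_zero] at hb
          have := List.all_eq_true.mp hb item hitem
          simp [hr] at this
        · exact ⟨f0, rfl⟩
      rw [pvBnd_succ] at hb
      have hb2 := List.all_eq_true.mp hb item hitem
      simp only [hr, Bool.not_true, Bool.false_or, Bool.and_eq_true] at hb2
      -- unfold FF tags h' (pvKey item)
      obtain ⟨h'', rfl⟩ : ∃ h'', h' = h'' + 1 := ⟨h' - 1, by omega⟩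
      rw [FF]
      rw [List.flatMap_map]
      apply pvFlatMapCongr
      intro r hrmem
      have hrok : pvItemOK r = true := itemOK_getT hok hrmem
      by_cases hrr : pvIsRef r
      · have hstr : pvStrip r = r := strip_of_ref hrr hrok
        rw [hstr]
        simp only [if_pos hrr]
        have hbk : pvBnd tags f0 (pvKey item) = true := hb2.2
        obtain ⟨e, rfl⟩ : ∃ e, f0 = e + 1 := by
          rcases f0 with _ | e
          · exfalso
            rw [pvBnd_zero] at hbk
            have := List.all_eq_true.mp hbk r hrmem
            simp [hrr] at this
          · exact ⟨e, rfl⟩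
        rw [pvBnd_succ] at hbk
        have hb3 := List.all_eq_true.mp hbk r hrmem
        simp only [hrr, Bool.not_true, Bool.false_or, Bool.and_eq_true] at hb3
        have h1 : FF (passTp tags) g' (pvKey r) = FF tags (h'' + 1) (pvKey r) :=
          ihs (e + 1) (by omega) (pvKey r) (pvBnd_mono hb3.2) g' (h'' + 1) (by omega) (by omega)
        have h2 : FF tags h'' (pvKey r) = FF tags (h'' + 1) (pvKey r) :=
          FF_stab hb3.2 (by omega) (by omega)
        rw [h1, h2]
      · have hnr : pvIsRef r = false := by simpa using hrr
        have hnr2 : pvIsRef (pvStrip r) = false := isRef_strip hnr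
        rw [if_neg (by simp [hnr2]), if_neg (by simp [hnr])]
        rw [strip_strip (by rw [pvItemOK, if_neg (by simp [hnr])] at hrok; exact hrok)]
    · simp only [if_neg hr]
      rw [List.flatMap_singleton]
      have hnr : pvIsRef (pvStrip item) = false := isRef_strip (by simpa using hr)
      rw [if_neg (by simp [hnr])]
      rw [strip_strip (by rw [pvItemOK, if_neg hr] at hiok; exact hiok)]

theorem TagsOK_pass {tags : List (String × List String)} (hok : TagsOK tags) :
    TagsOK (passTp tags) := by
  constructor
  · have : (passTp tags).map Prod.fst = tags.map Prod.fst := by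
      simp [passTp, List.map_map, Function.comp]
    rw [this]; exact hok.1
  · intro tg' htg' j hj
    simp only [passTp, List.mem_map] at htg'
    obtain ⟨tg, htg, rfl⟩ := htg'
    simp only [expandItems, List.mem_flatMap] at hj
    obtain ⟨item, hitem, hji⟩ := hj
    have hiok : pvItemOK item = true := hok.2 tg htg item hitem
    by_cases hr : pvIsRef item
    · rw [if_pos hr] at hji
      obtain ⟨r, hrmem, rfl⟩ := List.mem_map.mp hji
      exact itemOK_strip (itemOK_getT hok hrmem)
    · rw [if_neg hr] at hji
      simp only [List.mem_singleton] at hji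
      subst hji
      exact itemOK_strip hiok

-- ---------- global assembly ----------
theorem reD_false_iff {dic : List (String × List (String × List String))} :
    reD dic = false ↔ ∀ p ∈ dic, hasRefT p.2 = false := by
  simp [reD, List.any_eq_false]

theorem re_false_of_dec0 {dic : List (String × List (String × List String))}
    (hinv : InvD dic) (hdec : DecD dic 0) : reD dic = false := by
  rw [reD_false_iff]
  intro p hp
  rw [hasRefT, List.any_eq_false]
  intro tg htg
  simp only [Bool.not_eq_true, List.any_eq_false]
  intro item hitem
  have hb := hdec p hp tg htg
  rw [pvBnd_zero, getT_self (hinv p hp).1.1 htg, List.all_eq_true] at hb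
  simpa using hb item hitem

theorem passD_eq_Bchar {dic : List (String × List (String × List String))}
    (hre : reD dic = false) (hinv : InvD dic) : passD dic = Bchar dic := by
  unfold passD Bchar
  apply List.map_congr_left
  intro p hp
  have hpd : p ∈ dic := (List.mem_filter.mp hp).1
  have hnoref : hasRefT p.2 = false := (reD_false_iff.mp hre) p hpd
  rw [hasRefT, List.any_eq_false] at hnoref
  have hnd := (hinv p hpd).1.1
  simp only [Prod.mk.injEq, true_and]
  unfold passTp
  apply List.map_congr_left
  intro tg htg
  have hnr : ∀ item ∈ tg.2, pvIsRef item = false := by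
    intro item hitem
    have := hnoref tg htg
    simp only [Bool.not_eq_true, List.any_eq_false] at this
    simpa using this item hitem
  simp only [Prod.mk.injEq, true_and]
  rw [FF, getT_self hnd htg]
  unfold expandItems
  apply pvFlatMapCongr
  intro item hitem
  rw [if_neg (by simp [hnr item hitem]), if_neg (by simp [hnr item hitem])]

theorem mem_passD {dic : List (String × List (String × List String))}
    {p' : String × List (String × List String)} (h : p' ∈ passD dic) :
    ∃ p ∈ dic, p.2.isEmpty = false ∧ p' = (p.1, passTp p.2) := by
  simp only [passD, List.mem_map, List.mem_filter] at h
  obtain ⟨p, ⟨hp, hne⟩, rfl⟩ := h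
  exact ⟨p, hp, by simpa using hne, rfl⟩

theorem InvD_pass {dic : List (String × List (String × List String))} (hinv : InvD dic) :
    InvD (passD dic) := by
  intro p' hp'
  obtain ⟨p, hp, _, rfl⟩ := mem_passD hp'
  obtain ⟨hok, hbnd⟩ := hinv p hp
  refine ⟨TagsOK_pass hok, ?_⟩
  intro tg' htg'
  simp only [passTp, List.mem_map] at htg'
  obtain ⟨tg, htg, rfl⟩ := htg'
  have hlen : (passTp p.2).length = p.2.length := by simp [passTp]
  simp only [hlen]
  exact bnd_pass hok (pvBnd_mono (hbnd tg htg))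

theorem DecD_pass {dic : List (String × List (String × List String))} {d : Nat}
    (hinv : InvD dic) (hdec : DecD dic (d+1)) : DecD (passD dic) d := by
  intro p' hp'
  obtain ⟨p, hp, _, rfl⟩ := mem_passD hp'
  intro tg' htg'
  simp only [passTp, List.mem_map] at htg'
  obtain ⟨tg, htg, rfl⟩ := htg'
  exact bnd_pass (hinv p hp).1 (hdec p hp tg htg)

theorem Bchar_pass {dic : List (String × List (String × List String))} (hinv : InvD dic) :
    Bchar (passD dic) = Bchar dic := by
  unfold Bchar
  have hfilter : (passD dic).filter (fun p => !p.2.isEmpty) = passD dic := by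
    apply List.filter_eq_self.mpr
    intro p' hp'
    obtain ⟨p, _, hne, rfl⟩ := mem_passD hp'
    simp [passTp, List.isEmpty_iff]
    intro habs
    rw [habs] at hne
    simp at hne
  rw [hfilter]
  unfold passD
  rw [List.map_map]
  apply List.map_congr_left
  intro p hp
  have hpd : p ∈ dic := (List.mem_filter.mp hp).1
  obtain ⟨hok, hbnd⟩ := hinv p hpd
  simp only [Function.comp]
  simp only [Prod.mk.injEq, true_and]
  unfold passTp
  rw [List.map_map]
  apply List.map_congr_left
  intro tg htg
  simp only [Function.comp, Prod.mk.injEq, true_and]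
  have hlen : (List.map (fun tg => (tg.1, expandItems p.2 tg.2)) p.2).length = p.2.length := by
    simp
  rw [hlen]
  have : List.map (fun tg => (tg.1, expandItems p.2 tg.2)) p.2 = passTp p.2 := rfl
  rw [this]
  exact FF_pass hok (hbnd tg htg) (by omega) (by omega)

theorem go_eq : ∀ (d f : Nat) (dic : List (String × List (String × List String))),
    d + 1 ≤ f → InvD dic → DecD dic d → genTagGo f dic = Bchar dic := by
  intro d
  induction d with
  | zero =>
    intro f dic hf hinv hdec
    obtain ⟨f', rfl⟩ : ∃ f', f = f' + 1 := ⟨f - 1, by omega⟩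
    have hre : reD dic = false := re_false_of_dec0 hinv hdec
    rw [genTagGo]
    simp only [L_pass, hre, Bool.false_eq_true, if_false]
    exact passD_eq_Bchar hre hinv
  | succ d ih =>
    intro f dic hf hinv hdec
    obtain ⟨f', rfl⟩ : ∃ f', f = f' + 1 := ⟨f - 1, by omega⟩
    rw [genTagGo]
    simp only [L_pass]
    by_cases hre : reD dic
    · simp only [hre, if_true]
      rw [ih f' (passD dic) (by omega) (InvD_pass hinv) (DecD_pass hinv hdec)]
      exact Bchar_pass hinv
    · simp only [hre, Bool.false_eq_true, if_false]
      exact passD_eq_Bchar (by simpa using hre) hinv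

-- ===== VERDICT (by name: the statement is the Claim_ definition above) =====
theorem gen_tag_spec : Claim_equal_gen_tag := by
  intro dic _hdom hpre
  unfold Spec_gen_tag
  rw [L_Balt]
  unfold gen_tag
  have hinv : InvD dic := by
    intro p hp
    obtain ⟨hnd, hok, hbnd⟩ := hpre.2 p hp
    exact ⟨⟨hnd, hok⟩, hbnd⟩
  have hdec : DecD dic ((dic.map (fun p => p.2.length)).sum) := by
    intro p hp tg htg
    apply pvBnd_le _ ((hpre.2 p hp).2.2 tg htg)
    exact List.single_le_sum (fun _ _ => Nat.zero_le _) _ (List.mem_map_of_mem hp)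
  exact go_eq ((dic.map (fun p => p.2.length)).sum) ((dic.map (fun p => p.2.length)).sum + 2)
    dic (by omega) hinv hdec
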